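-- pv_equiv track=rewrite | github.com/yngtodd/HyperSpace | hyperspace/space/mapping_space.py | fold_spaces
-- ===== SOURCE A (Python) =====
-- def fold_spaces(low_spaces, high_spaces):
--     """
--     Creates all possible combinations of hyperspaces.
--
--     Parameters
--     ----------
--     * `low_spaces` [list, shape=(n_spaces,)]:
--         lower spaces defined by hyperspace classes.
--
--     * `high_spaces` [list, shape=(n_spaces,)]:
--         lower spaces defined by hyperspace classes.
--
--     Returns
--     -------
--     * `hyperspace` [`list of lists`, shape=(2**n_spaces, n_spaces)]:
--         - All combinations of hyperspaces. Each list within hyperspace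
--           is a search space to be distributed across 2**n_spaces nodes.
--     """
--     if len(low_spaces)  != len(high_spaces):
--         raise ValueError(("low_spaces and high_spaces must have the same length. "
--                          "Got {} and {} respectively.".format(len(low_spaces), len(high_spaces))))
--
--     indices = len(low_spaces)
--     num_hyperspaces = 2**indices
--     hyperspace = [[] for i in range(num_hyperspaces)]
--
--     for space in range(num_hyperspaces):
--         for index in range(indices):
--             bit_tester = 1 << index
--             if space & bit_tester:
--                 hyperspace[space].insert(index, low_spaces[index])
--             else:
--                 hyperspace[space].insert(index, high_spaces[index])
--
--     return hyperspace
-- ===== SOURCE B (Python) =====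
-- def fold_spaces(low_spaces, high_spaces):
--     if len(low_spaces) != len(high_spaces):
--         raise ValueError(("low_spaces and high_spaces must have the same length. "
--                          "Got {} and {} respectively.".format(len(low_spaces), len(high_spaces))))
--     rows = [[]]
--     for h, l in zip(reversed(high_spaces), reversed(low_spaces)):
--         rows = [[c] + row for row in rows for c in (h, l)]
--     return rows
-- ===== Notes on version B (the rewrite author's own statement) =====
-- stated objective: simpler
-- what changed: B builds the 2^n rows as an iterated Cartesian product, prepending each index's high/low choice starting from the last index, instead of A's preallocated table filled by per-row bit tests with shifts and masks.
import Mathlib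
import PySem

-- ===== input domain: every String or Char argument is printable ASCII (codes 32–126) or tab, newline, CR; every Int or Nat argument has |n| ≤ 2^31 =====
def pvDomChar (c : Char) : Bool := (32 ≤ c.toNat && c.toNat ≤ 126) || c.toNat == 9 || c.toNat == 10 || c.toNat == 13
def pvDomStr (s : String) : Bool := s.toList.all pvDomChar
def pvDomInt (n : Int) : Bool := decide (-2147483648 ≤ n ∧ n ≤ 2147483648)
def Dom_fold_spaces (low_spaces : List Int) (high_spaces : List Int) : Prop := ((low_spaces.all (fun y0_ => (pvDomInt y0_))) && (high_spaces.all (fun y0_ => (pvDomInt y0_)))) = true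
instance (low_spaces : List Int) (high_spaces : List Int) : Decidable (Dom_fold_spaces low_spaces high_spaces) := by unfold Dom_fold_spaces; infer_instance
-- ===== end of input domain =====

-- B builds the 2^n rows as an iterated Cartesian product (prepending each index's
-- high/low choice, last index first) instead of A's per-row bit tests; objective: simpler.


-- ===== PORT A =====
-- literal port of A; the length-mismatch ValueError is excluded by Pre_fold_spaces.
-- 2**indices is written 2 ^ indices.toNat (indices = len(low_spaces) ≥ 0);
-- 1 << index is (1 : Int) <<< index.toNat (index ≥ 0, from range); hyperspace[space].insert(...)
-- (in-place row mutation) is transcribed as setting entry `space` to the inserted row.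
def fold_spaces (low_spaces : List Int) (high_spaces : List Int) : List (List Int) :=
  let indices : Int := low_spaces.length
  let num_hyperspaces : Int := 2 ^ indices.toNat
  let hyperspace : List (List Int) := (PySem.List.pyRange 0 num_hyperspaces 1).map (fun _ => [])
  (PySem.List.pyRange 0 num_hyperspaces 1).foldl (fun hyperspace space =>
    (PySem.List.pyRange 0 indices 1).foldl (fun hyperspace index =>
      let bit_tester : Int := (1 : Int) <<< index.toNat
      if PySem.Int.band space bit_tester ≠ 0 then
        PySem.List.pySetD hyperspace space
          (PySem.List.insert (PySem.List.pyGetD hyperspace space []) index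
            (PySem.List.pyGetD low_spaces index 0))
      else
        PySem.List.pySetD hyperspace space
          (PySem.List.insert (PySem.List.pyGetD hyperspace space []) index
            (PySem.List.pyGetD high_spaces index 0))) hyperspace) hyperspace

-- ===== PORT B =====
-- port of Source B: rows = [[]]; for h, l in zip(reversed(high), reversed(low)):
--   rows = [[c] + row for row in rows for c in (h, l)]
def fold_spaces_alt (low_spaces : List Int) (high_spaces : List Int) : List (List Int) :=
  (high_spaces.reverse.zip low_spaces.reverse).foldl
    (fun rows hl => rows.flatMap (fun row => [hl.1 :: row, hl.2 :: row])) [[]]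

-- ===== PRECONDITION & SPEC =====
-- Pre_ excludes exactly the inputs of unequal length, on which both A and B raise ValueError.
def Pre_fold_spaces (low_spaces : List Int) (high_spaces : List Int) : Prop :=
  low_spaces.length = high_spaces.length
instance (low_spaces : List Int) (high_spaces : List Int) : Decidable (Pre_fold_spaces low_spaces high_spaces) := by unfold Pre_fold_spaces; infer_instance
def pvWitness_fold_spaces : List Int × List Int := ([1, 2], [10, 20])

def Spec_fold_spaces (low_spaces : List Int) (high_spaces : List Int) (out : List (List Int)) : Prop := out = fold_spaces_alt low_spaces high_spaces
instance (low_spaces : List Int) (high_spaces : List Int) (out : List (List Int)) : Decidable (Spec_fold_spaces low_spaces high_spaces out) := by unfold Spec_fold_spaces; infer_instance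

-- ===== CLAIM (what is proved, stated in full; the proofs are below) =====
def Claim_equal_fold_spaces : Prop := ∀ (low_spaces : List Int) (high_spaces : List Int), Dom_fold_spaces low_spaces high_spaces → Pre_fold_spaces low_spaces high_spaces → Spec_fold_spaces low_spaces high_spaces (fold_spaces low_spaces high_spaces)

-- ===== LEMMAS AND PROOFS =====

-- the common specification: row s has, at index i, low[i] if bit i of s is set else high[i]
def pvRow (low high : List Int) (s : Nat) : List Int :=
  (List.range low.length).map (fun i => if s.testBit i then low.getD i 0 else high.getD i 0)

def pvTable (low high : List Int) : List (List Int) :=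
  (List.range (2 ^ low.length)).map (pvRow low high)

-- ---- B side ----

theorem pv_zip_reverse : ∀ (h l : List Int), h.length = l.length →
    h.reverse.zip l.reverse = (h.zip l).reverse := by
  intro h
  induction h with
  | nil => intro l hl; cases l with
    | nil => rfl
    | cons _ _ => simp at hl
  | cons x h ih =>
    intro l hl
    cases l with
    | nil => simp at hl
    | cons y l =>
      have hl' : h.length = l.length := by simpa using hl
      simp only [List.reverse_cons, List.zip_cons_cons]
      rw [List.zip_append (by simp [hl']), ih l hl']
      simp

theorem pv_range_double (m : Nat) :
    List.range (2 * m) = (List.range m).flatMap (fun k => [2 * k, 2 * k + 1]) := by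
  induction m with
  | zero => rfl
  | succ m ih => simp [Nat.mul_succ, List.range_succ, ih]

theorem pvRow_cons (x y : Int) (low high : List Int) (s : Nat) :
    pvRow (x :: low) (y :: high) s
      = (if s.testBit 0 then x else y) :: pvRow low high (s / 2) := by
  simp only [pvRow, List.length_cons, List.range_succ_eq_map, List.map_cons, List.map_map]
  congr 1
  apply List.map_congr_left
  intro i _
  simp [Nat.testBit_add_one]

theorem pv_alt_eq (low high : List Int) (hl : low.length = high.length) :
    fold_spaces_alt low high = pvTable low high := by
  unfold fold_spaces_alt
  rw [pv_zip_reverse high low hl.symm, List.foldl_reverse]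
  induction low generalizing high with
  | nil =>
    cases high with
    | nil => rfl
    | cons _ _ => simp at hl
  | cons x low ih =>
    cases high with
    | nil => simp at hl
    | cons y high =>
      simp only [List.zip_cons_cons, List.foldr_cons]
      rw [ih high (by simpa using hl)]
      simp only [pvTable, List.length_cons, pow_succ, mul_comm (2 ^ low.length) 2,
        pv_range_double, List.map_flatMap, List.flatMap_map]
      refine List.flatMap_congr fun k _ => ?_
      simp [pvRow_cons, Nat.testBit_zero, Nat.mul_add_div]

-- ---- A side ----

theorem pv_cond_iff (k j : Nat) :
    (PySem.Int.band (k : Int) ((1 : Int) <<< (j : Int)) ≠ 0) ↔ Nat.testBit k j := by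
  have h1 : (1 : Int) <<< (j : Int) = ((2 ^ j : Nat) : Int) := by
    exact Int.one_shiftLeft j
  rw [h1, PySem.Int.band_natCast]
  rw [Nat.and_two_pow]
  cases hb : Nat.testBit k j <;> simp

-- the inner loop of A, over the mapped index range, localizes to entry k of hyperspace
-- and builds the row step by step
theorem pv_inner (low high : List Int) (k : Nat) :
    ∀ (js : List Nat) (hs : List (List Int)), k < hs.length →
    ((js.map (fun (j : Nat) => (j : Int))).foldl
      (fun hyperspace index =>
        if PySem.Int.band (k : Int) ((1 : Int) <<< index.toNat) ≠ 0 then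
          PySem.List.pySetD hyperspace (k : Int)
            (PySem.List.insert (PySem.List.pyGetD hyperspace (k : Int) []) index
              (PySem.List.pyGetD low index 0))
        else
          PySem.List.pySetD hyperspace (k : Int)
            (PySem.List.insert (PySem.List.pyGetD hyperspace (k : Int) []) index
              (PySem.List.pyGetD high index 0))) hs)
      = hs.set k (js.foldl
          (fun row j => if Nat.testBit k j
            then PySem.List.insert row (j : Int) (low.getD j 0)
            else PySem.List.insert row (j : Int) (high.getD j 0)) (hs.getD k [])) := by
  intro js
  induction js with
  | nil =>
    intro hs hk
    simp only [List.map_nil, List.foldl_nil]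
    rw [List.getD_eq_getElem _ _ hk, List.set_getElem_self]
  | cons j js ih =>
    intro hs hk
    simp only [List.map_cons, List.foldl_cons]
    rw [ih _ (by split <;> simpa [PySem.List.length_pySetD] using hk)]
    simp only [Int.toNat_natCast, PySem.List.pySetD_natCast, PySem.List.pyGetD_natCast]
    by_cases hb : Nat.testBit k j
    · rw [if_pos ((pv_cond_iff k j).mpr hb), if_pos hb]
      simp [List.set_set, List.getD_eq_getElem?_getD, List.getElem?_set_self hk]
    · rw [if_neg (fun hc => hb ((pv_cond_iff k j).mp hc)), if_neg hb]
      simp [List.set_set, List.getD_eq_getElem?_getD, List.getElem?_set_self hk]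

-- the inner loop starting from [] builds pvRow
theorem pv_row_build (low high : List Int) (k : Nat) :
    (List.range low.length).foldl
      (fun row j => if Nat.testBit k j
        then PySem.List.insert row (j : Int) (low.getD j 0)
        else PySem.List.insert row (j : Int) (high.getD j 0)) []
      = pvRow low high k := by
  suffices h : ∀ m, (List.range m).foldl
      (fun row j => if Nat.testBit k j
        then PySem.List.insert row (j : Int) (low.getD j 0)
        else PySem.List.insert row (j : Int) (high.getD j 0)) []
      = (List.range m).map (fun i => if k.testBit i then low.getD i 0 else high.getD i 0) by
    exact h low.length
  intro m
  induction m with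
  | zero => rfl
  | succ m ih =>
    rw [List.range_succ, List.foldl_append, ih, List.map_append]
    have hlen : ((List.range m).map
        (fun i => if k.testBit i then low.getD i 0 else high.getD i 0)).length = m := by simp
    simp only [List.foldl_cons, List.foldl_nil, List.map_cons, List.map_nil]
    by_cases hb : Nat.testBit k m
    · rw [if_pos hb, PySem.List.insert_natCast _ _ _ (le_of_eq hlen.symm)]
      rw [List.take_of_length_le (le_of_eq hlen), List.drop_of_length_le (le_of_eq hlen)]
      simp [hb]
    · rw [if_neg hb, PySem.List.insert_natCast _ _ _ (le_of_eq hlen.symm)]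
      rw [List.take_of_length_le (le_of_eq hlen), List.drop_of_length_le (le_of_eq hlen)]
      simp [hb]

-- the outer loop: distinct indices, each entry still empty, each step overwrites one entry
theorem pv_outer_gen (S : List (List Int) → Nat → List (List Int))
    (R : List Int → Nat → List Int)
    (hS : ∀ hs k, k < hs.length → S hs k = hs.set k (R (hs.getD k []) k)) :
    ∀ (ks : List Nat) (hs : List (List Int)),
      (∀ k ∈ ks, k < hs.length ∧ hs.getD k [] = []) → ks.Nodup →
      ∀ i, (ks.foldl S hs)[i]? = if i ∈ ks then some (R [] i) else hs[i]? := by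
  intro ks
  induction ks with
  | nil => intro hs _ _ i; simp
  | cons k ks ih =>
    intro hs hmem hnd i
    obtain ⟨hk, hk0⟩ := hmem k (by simp)
    simp only [List.foldl_cons]
    rw [hS hs k hk, hk0]
    have hnd' := (List.nodup_cons.mp hnd)
    rw [ih (hs.set k (R [] k))
      (by
        intro k' hk'
        have hne : k' ≠ k := fun h => hnd'.1 (h ▸ hk')
        refine ⟨by simpa using (hmem k' (by simp [hk'])).1, ?_⟩
        rw [List.getD_eq_getElem?_getD, List.getElem?_set_ne (by omega)]
        rw [← List.getD_eq_getElem?_getD]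
        exact (hmem k' (by simp [hk'])).2)
      hnd'.2 i]
    by_cases hik : i ∈ ks
    · simp [hik]
    · by_cases hie : i = k
      · subst hie
        simp [hik, List.getElem?_set_self hk]
      · simp [hik, hie, List.getElem?_set_ne (fun h : k = i => hie h.symm)]

theorem pv_a_eq (low high : List Int) :
    fold_spaces low high = pvTable low high := by
  simp only [fold_spaces]
  rw [show ((2 : Int) ^ ((low.length : Int)).toNat) = ((2 ^ low.length : Nat) : Int) by
        rw [Int.toNat_natCast]; push_cast; ring]
  rw [PySem.List.pyRange_zero_nat, PySem.List.pyRange_zero_nat]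
  set n := low.length with hn
  set N := 2 ^ n with hN
  rw [List.foldl_map]
  have hinit : ((List.range N).map (fun (k : Nat) => (k : Int))).map
      (fun _ => ([] : List Int)) = (List.range N).map (fun _ => ([] : List Int)) := by
    rw [List.map_map]
    exact List.map_congr_left (fun _ _ => rfl)
  rw [hinit]
  apply List.ext_getElem?
  intro i
  rw [pv_outer_gen _
    (fun row k => (List.range n).foldl
      (fun row j => if Nat.testBit k j
        then PySem.List.insert row (j : Int) (low.getD j 0)
        else PySem.List.insert row (j : Int) (high.getD j 0)) row)
    (fun hs k hk => pv_inner low high k (List.range n) hs hk)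
    (List.range N) _
    (by intro k hk
        constructor
        · simpa using hk
        · have hopt : ∀ (o : Option Nat), ((o.map (fun _ => ([] : List Int))).getD []) = [] := by
            intro o; cases o <;> rfl
          rw [List.getD_eq_getElem?_getD, List.getElem?_map]
          exact hopt _)
    (List.nodup_range) i]
  simp only [hN, hn]
  simp only [pv_row_build]
  by_cases hi : i < 2 ^ low.length
  · simp [pvTable, hi]
  · simp [pvTable, hi]

-- ===== VERDICT (by name: the statement is the Claim_ definition above) =====
theorem fold_spaces_spec : Claim_equal_fold_spaces := by
  intro low high _ hpre
  unfold Spec_fold_spaces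
  rw [pv_a_eq low high, pv_alt_eq low high hpre]
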